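-- pv_equiv track=rewrite | github.com/ansible/ansible-risk-insight | ansible_risk_insight/rules/download_exec.py | _is_executed
-- ===== SOURCE A (Python) =====
-- non_execution_programs: list = ["tar", "gunzip", "unzip", "mv", "cp"]
--
-- def _is_executed(cmd_str, target):
--     lines = cmd_str.splitlines()
--     found = False
--     for line in lines:
--         if target not in line:
--             continue
--         if line.startswith(target):
--             found = True
--         if _is_primary_command_target(line, target):
--             found = True
--         if found:
--             break
--     return found
--
-- def _is_primary_command_target(line, target):
--     parts = []
--     is_in_variable = False
--     concat_p = ""
--     for p in line.split(" "):
--         if "{{" in p and "}}" not in p: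
--             is_in_variable = True
--         if "}}" in p:
--             is_in_variable = False
--         concat_p += " " + p if concat_p != "" else p
--         if not is_in_variable:
--             parts.append(concat_p)
--             concat_p = ""
--     current_index = 0
--     found_index = -1
--     for p in parts:
--         if current_index == 0:
--             program = p if "/" not in p else p.split("/")[-1]
--             # filter out some specific non-exec patterns
--             if program in non_execution_programs:
--                 break
--         if p.startswith(target):
--             found_index = current_index
--             break
--         if p.startswith("-"):
--             continue
--         current_index += 1
--     # "<target.sh> option1 option2" => found_index == 0
--     # python -u <target.py> ==> found_index == 1
--     is_primay_target = found_index >= 0 and found_index <= 1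
--     return is_primay_target
-- ===== SOURCE B (Python) =====
-- non_execution_programs: list = ["tar", "gunzip", "unzip", "mv", "cp"]
--
--
-- def _merge_variable_parts(line):
--     """Tokenize on spaces, slicing out whole {{ ... }} variable spans by index jumps."""
--     pieces = line.split(" ")
--     n = len(pieces)
--     parts = []
--     i = 0
--     while i < n:
--         p = pieces[i]
--         if "{{" in p and "}}" not in p:
--             j = i + 1
--             while j < n and "}}" not in pieces[j]:
--                 j += 1
--             if j == n:
--                 break  # unterminated variable: the rest of the line yields no parts
--             parts.append(" ".join(pieces[i:j + 1]))
--             i = j + 1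
--         else:
--             parts.append(p)
--             i += 1
--     return parts
--
--
-- def _program_name(p):
--     return p.split("/")[-1] if "/" in p else p
--
--
-- def _is_primary_command_target(line, target):
--     parts = _merge_variable_parts(line)
--     # effective index of parts[i] = number of non-option parts before it
--     effs = []
--     c = 0
--     for p in parts:
--         effs.append(c)
--         if not p.startswith("-"):
--             c += 1
--     m = next((i for i, p in enumerate(parts) if p.startswith(target)), None)
--     if m is None:
--         return False
--     if any(effs[i] == 0 and _program_name(parts[i]) in non_execution_programs
--            for i in range(m + 1)):
--         return False
--     return effs[m] <= 1
--
--
-- def _is_executed(cmd_str, target):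
--     return any(
--         line.startswith(target) or _is_primary_command_target(line, target)
--         for line in cmd_str.splitlines()
--         if target in line
--     )
-- ===== Notes on version B (the rewrite author's own statement) =====
-- stated objective: alternative
-- what changed: The stateful space-fold tokenizer becomes an index-jump scan that slices out whole {{..}} spans, and the sequential found_index walk becomes staged passes: precompute each part's effective index, locate the first target match, then test the non-exec break over that prefix; the line loop becomes a filtered any().
import Mathlib
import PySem

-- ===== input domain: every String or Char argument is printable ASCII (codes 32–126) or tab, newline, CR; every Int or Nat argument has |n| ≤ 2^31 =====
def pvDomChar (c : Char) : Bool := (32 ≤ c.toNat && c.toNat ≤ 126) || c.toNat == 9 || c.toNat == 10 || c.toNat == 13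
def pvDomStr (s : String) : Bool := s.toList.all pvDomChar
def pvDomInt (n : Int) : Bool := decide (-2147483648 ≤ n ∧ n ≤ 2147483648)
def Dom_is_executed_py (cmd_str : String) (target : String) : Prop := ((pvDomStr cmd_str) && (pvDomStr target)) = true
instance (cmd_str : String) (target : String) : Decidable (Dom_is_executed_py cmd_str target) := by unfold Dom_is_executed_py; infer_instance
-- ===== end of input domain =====

-- B replaces A's stateful tokenizer fold by an index-jump slicer and A's sequential found_index walk
-- by staged passes (effective indices, first match, prefix non-exec check); same value everywhere
-- (objective: alternative algorithm, not speed).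

-- module constant non_execution_programs (shared by both Pythons)
def pvNonExec : List String := ["tar", "gunzip", "unzip", "mv", "cp"]

-- ===== PORT A =====
-- one step of A's first loop; state = (parts, is_in_variable, concat_p)
def pvA_tokStep (st : List String × Bool × String) (p : String) : List String × Bool × String :=
  let inv := if PySem.Str.isIn "{{" p && !(PySem.Str.isIn "}}" p) then true else st.2.1
  let inv := if PySem.Str.isIn "}}" p then false else inv
  let cat := if st.2.2 ≠ "" then st.2.2 ++ " " ++ p else p
  if !inv then (st.1 ++ [cat], inv, "") else (st.1, inv, cat)

-- A's second loop with its two breaks, returning found_index (-1 = not found)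
def pvA_scan (target : String) : List String → Int → Int
  | [], _ => -1
  | p :: rest, ci =>
    if ci == 0 && pvNonExec.contains
        (if !(PySem.Str.isIn "/" p) then p else ((PySem.Str.split? p "/").getD []).getLastD "") then -1
    else if PySem.Str.startswith p target then ci
    else if PySem.Str.startswith p "-" then pvA_scan target rest ci
    else pvA_scan target rest (ci + 1)

def pvA_isPrimary (line : String) (target : String) : Bool :=
  -- line.split(" "): sep " " ≠ "" so split? is some; ported as getD []
  let parts := (((PySem.Str.split? line " ").getD []).foldl pvA_tokStep ([], false, "")).1
  let fi := pvA_scan target parts 0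
  decide (0 ≤ fi) && decide (fi ≤ 1)

-- A's line loop: found is always false when an iteration starts (the loop breaks as soon as it is set)
def pvA_lineLoop (target : String) : List String → Bool
  | [] => false
  | line :: rest =>
    if !(PySem.Str.isIn target line) then pvA_lineLoop target rest
    else
      let found := false
      let found := if PySem.Str.startswith line target then true else found
      let found := if pvA_isPrimary line target then true else found
      if found then true else pvA_lineLoop target rest

def is_executed_py (cmd_str : String) (target : String) : Bool :=
  pvA_lineLoop target (PySem.Str.splitlines cmd_str)

-- ===== PORT B =====
-- _program_name: p.split("/")[-1] if "/" in p else p  (split result is nonempty, [-1] ported as getLastD)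
def pvProgramName (p : String) : String :=
  if !(PySem.Str.isIn "/" p) then p else ((PySem.Str.split? p "/").getD []).getLastD ""

-- inner 'while j < n and "}}" not in pieces[j]: j += 1' of _merge_variable_parts
def pvB_findClose (pieces : List String) (j : Nat) : Nat :=
  if h : j < pieces.length then
    if PySem.Str.isIn "}}" (pieces.getD j "") then j else pvB_findClose pieces (j + 1)
  else j
termination_by pieces.length - j

-- lower bound needed for the outer loop's termination, cited by name below
theorem pvB_findClose_ge (pieces : List String) (j : Nat) : j ≤ pvB_findClose pieces j := by
  unfold pvB_findClose
  split
  · split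
    · exact le_refl j
    · exact Nat.le_trans (Nat.le_succ j) (pvB_findClose_ge pieces (j + 1))
  · exact le_refl j
termination_by pieces.length - j

-- outer 'while i < n' of _merge_variable_parts; indices are in range, pieces[i] ported as getD,
-- the slice pieces[i:j+1] (0 ≤ i ≤ j+1 ≤ n) ported as (drop i).take (j+1-i) — exact on that range
def pvB_loop (pieces : List String) (i : Nat) (parts : List String) : List String :=
  if h : i < pieces.length then
    let p := pieces.getD i ""
    if PySem.Str.isIn "{{" p && !(PySem.Str.isIn "}}" p) then
      let j := pvB_findClose pieces (i + 1)
      if j == pieces.length then parts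
      else pvB_loop pieces (j + 1) (parts ++ [PySem.Str.join " " ((pieces.drop i).take (j + 1 - i))])
    else pvB_loop pieces (i + 1) (parts ++ [p])
  else parts
termination_by pieces.length - i
decreasing_by
  · have := pvB_findClose_ge pieces (i + 1); omega
  · omega

def pvB_tokenize (line : String) : List String :=
  pvB_loop ((PySem.Str.split? line " ").getD []) 0 []

-- the effective-index pass: effs, c loop of _is_primary_command_target
def pvB_effs (parts : List String) : List Int :=
  (parts.foldl (fun (st : List Int × Int) p =>
    (st.1 ++ [st.2], if !(PySem.Str.startswith p "-") then st.2 + 1 else st.2)) ([], 0)).1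

-- staged judge: first match index, non-exec check over the prefix, effective index ≤ 1
def pvB_primary (line : String) (target : String) : Bool :=
  let parts := pvB_tokenize line
  let effs := pvB_effs parts
  match parts.findIdx? (fun p => PySem.Str.startswith p target) with
  | none => false
  | some m =>
    if (List.range (m + 1)).any (fun i =>
        effs.getD i 0 == 0 && pvNonExec.contains (pvProgramName (parts.getD i ""))) then false
    else decide (effs.getD m 0 ≤ 1)

def is_executed_py_alt (cmd_str : String) (target : String) : Bool :=
  (PySem.Str.splitlines cmd_str).any fun line =>
    PySem.Str.isIn target line &&
      (PySem.Str.startswith line target || pvB_primary line target)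

-- ===== PRECONDITION & SPEC =====
def Spec_is_executed_py (cmd_str : String) (target : String) (out : Bool) : Prop := out = is_executed_py_alt cmd_str target
instance (cmd_str : String) (target : String) (out : Bool) : Decidable (Spec_is_executed_py cmd_str target out) := by unfold Spec_is_executed_py; infer_instance

-- ===== CLAIM (what is proved, stated in full; the proofs are below) =====
def Claim_equal_is_executed_py : Prop := ∀ (cmd_str : String) (target : String), Dom_is_executed_py cmd_str target → Spec_is_executed_py cmd_str target (is_executed_py cmd_str target)


-- ===== LEMMAS AND PROOFS =====

def pvSplitClose : List String → Option (List String × String × List String)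
  | [] => none
  | q :: rest =>
    if PySem.Str.isIn "}}" q then some ([], q, rest)
    else (pvSplitClose rest).map (fun x => (q :: x.1, x.2.1, x.2.2))

def pvWalk (target : String) : List String → Int → Bool
  | [], _ => false
  | p :: rest, idx =>
    if idx == 0 && pvNonExec.contains (pvProgramName p) then false
    else if PySem.Str.startswith p target then decide (idx ≤ 1)
    else if PySem.Str.startswith p "-" then pvWalk target rest idx
    else pvWalk target rest (idx + 1)

def pvEffsR (c : Int) : List String → List Int
  | [] => []
  | p :: t => c :: pvEffsR (if !(PySem.Str.startswith p "-") then c + 1 else c) t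

def pvStagedIf (target : String) (parts : List String) (c : Int) (m : Nat) : Bool :=
  if (List.range (m + 1)).any (fun i =>
      (pvEffsR c parts).getD i 0 == 0 && pvNonExec.contains (pvProgramName (parts.getD i ""))) then
    false
  else decide ((pvEffsR c parts).getD m 0 ≤ 1)

def pvStaged (target : String) (parts : List String) (c : Int) : Bool :=
  match parts.findIdx? (fun p => PySem.Str.startswith p target) with
  | none => false
  | some m => pvStagedIf target parts c m

lemma pvStaged_none {target : String} {parts : List String} {c : Int}
    (h : parts.findIdx? (fun p => PySem.Str.startswith p target) = none) :
    pvStaged target parts c = false := by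
  unfold pvStaged; rw [h]

lemma pvStaged_some {target : String} {parts : List String} {c : Int} {m : Nat}
    (h : parts.findIdx? (fun p => PySem.Str.startswith p target) = some m) :
    pvStaged target parts c = pvStagedIf target parts c m := by
  unfold pvStaged; rw [h]

lemma pv_join_singleton (p : String) : PySem.Str.join " " [p] = p := by
  apply String.toList_inj.mp
  simp [PySem.Str.toList_join, PySem.Chars.join_singleton]

lemma pv_join_cons2 (c x : String) (t : List String) :
    PySem.Str.join " " (c :: x :: t) = PySem.Str.join " " ((c ++ " " ++ x) :: t) := by
  cases t with
  | nil =>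
    apply String.toList_inj.mp
    simp [PySem.Str.toList_join, PySem.Chars.join_cons_cons, PySem.Chars.join_singleton,
      String.toList_append]
  | cons y t' =>
    apply String.toList_inj.mp
    simp [PySem.Str.toList_join, PySem.Chars.join_cons_cons, String.toList_append,
      List.append_assoc]

lemma pv_ne_empty_of_isIn_braces (p : String) (h : PySem.Str.isIn "{{" p = true) : p ≠ "" := by
  intro he; subst he
  rw [PySem.Str.isIn_iff_infix] at h
  simp at h

lemma pv_append_ne_empty (a b p : String) (h : a ≠ "") : a ++ b ++ p ≠ "" := by
  intro he
  have h2 : a = "" ∧ b = "" ∧ p = "" := by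
    have := congrArg String.toList he
    simpa [String.toList_append] using this
  exact h h2.1

lemma pv_take_len (pre : List String) (q : String) (post : List String) :
    (pre ++ q :: post).take (pre.length + 1) = pre ++ [q] := by
  induction pre with
  | nil => simp
  | cons a t ih => simp [ih]

lemma pv_drop_len (pre : List String) (q : String) (post : List String) :
    (pre ++ q :: post).drop (pre.length + 1) = post := by
  induction pre with
  | nil => simp
  | cons a t ih => simpa using ih

lemma pv_getD_of_lt (pieces : List String) (s : Nat) (h : s < pieces.length) :
    pieces.getD s "" = pieces[s] := by
  simp [List.getD, List.getElem?_eq_getElem h]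


lemma pv_open_scan (l : List String) (parts : List String) (c : String) (hc : c ≠ "") :
    (l.foldl pvA_tokStep (parts, true, c)).1 =
      (match pvSplitClose l with
       | none => parts
       | some (pre, q, post) =>
         (post.foldl pvA_tokStep (parts ++ [PySem.Str.join " " (c :: (pre ++ [q]))], false, "")).1) := by
  induction l generalizing parts c with
  | nil => simp [pvSplitClose]
  | cons q rest ih =>
    by_cases h2 : PySem.Str.isIn "}}" q = true
    · have hstep : pvA_tokStep (parts, true, c) q = (parts ++ [c ++ " " ++ q], false, "") := by
        simp at h2; simp [pvA_tokStep, h2, hc]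
      have hj : PySem.Str.join " " (c :: ([] ++ [q])) = c ++ " " ++ q := by
        simpa [pv_join_singleton] using pv_join_cons2 c q []
      simp only [pvSplitClose, h2, if_true, List.foldl_cons, hstep, hj]
    · have hstep : pvA_tokStep (parts, true, c) q = (parts, true, c ++ " " ++ q) := by
        simp at h2; simp [pvA_tokStep, h2, hc]
      have hc' : c ++ " " ++ q ≠ "" := pv_append_ne_empty c " " q hc
      have hsplit : pvSplitClose (q :: rest) =
          (pvSplitClose rest).map (fun x => (q :: x.1, x.2.1, x.2.2)) := by
        simp only [pvSplitClose, h2, Bool.false_eq_true, if_false]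
      simp only [List.foldl_cons, hstep, hsplit]
      rw [ih parts (c ++ " " ++ q) hc']
      cases hsc : pvSplitClose rest with
      | none => simp
      | some x =>
        obtain ⟨pre, cq, post⟩ := x
        simp only [Option.map_some]
        rw [← pv_join_cons2]
        simp

theorem pv_findClose_spec (pieces : List String) (s : Nat) (hs : s ≤ pieces.length) :
    (match pvSplitClose (pieces.drop s) with
     | none => pvB_findClose pieces s = pieces.length
     | some x => pvB_findClose pieces s = s + x.1.length ∧
         pieces.drop s = x.1 ++ x.2.1 :: x.2.2) := by
  by_cases h : s < pieces.length
  · have hdrop : pieces.drop s = pieces[s] :: pieces.drop (s + 1) :=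
      List.drop_eq_getElem_cons h
    by_cases h2 : PySem.Str.isIn "}}" pieces[s] = true
    · have heq : pvB_findClose pieces s = s := by
        unfold pvB_findClose
        have h2' := h2; simp at h2'
        simp [h, pv_getD_of_lt pieces s h, h2']
      rw [hdrop]
      simp only [pvSplitClose, h2, if_true]
      exact ⟨by rw [heq]; simp, by simp⟩
    · have hrec : pvB_findClose pieces s = pvB_findClose pieces (s + 1) := by
        conv_lhs => unfold pvB_findClose
        have h2' := h2; simp at h2'
        simp [h, pv_getD_of_lt pieces s h, h2']
      have ihs := pv_findClose_spec pieces (s + 1) (by omega)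
      rw [hdrop]
      simp only [pvSplitClose, h2, Bool.false_eq_true, if_false]
      cases hsc : pvSplitClose (pieces.drop (s + 1)) with
      | none =>
        rw [hsc] at ihs
        simpa [hrec] using ihs
      | some x =>
        rw [hsc] at ihs
        obtain ⟨pre, q, post⟩ := x
        obtain ⟨h1, hdec⟩ := ihs
        simp only [Option.map_some]
        refine ⟨by rw [hrec, h1]; simp; omega, by rw [hdec]; simp⟩
  · have hd : pieces.drop s = [] := List.drop_eq_nil_of_le (by omega)
    have heq : pvB_findClose pieces s = s := by
      unfold pvB_findClose
      simp [h]
    rw [hd]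
    simp only [pvSplitClose]
    rw [heq]; omega
termination_by pieces.length - s

theorem pv_loop_eq (pieces : List String) (i : Nat) (parts : List String) :
    pvB_loop pieces i parts = ((pieces.drop i).foldl pvA_tokStep (parts, false, "")).1 := by
  by_cases h : i < pieces.length
  · have hdrop : pieces.drop i = pieces[i] :: pieces.drop (i + 1) :=
      List.drop_eq_getElem_cons h
    set p := pieces[i] with hp
    by_cases hop : (PySem.Str.isIn "{{" p && !(PySem.Str.isIn "}}" p)) = true
    · obtain ⟨ho1, ho2⟩ := Bool.and_eq_true .. |>.mp hop
      have h2 : PySem.Str.isIn "}}" p = false := by simpa using ho2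
      have hstep : pvA_tokStep (parts, false, "") p = (parts, true, p) := by
        have h1' := ho1; have h2' := h2; simp at h1' h2'
        simp [pvA_tokStep, h1', h2']
      have hpne : p ≠ "" := pv_ne_empty_of_isIn_braces p ho1
      have hfc := pv_findClose_spec pieces (i + 1) (by omega)
      cases hsc : pvSplitClose (pieces.drop (i + 1)) with
      | none =>
        rw [hsc] at hfc
        have hB : pvB_loop pieces i parts = parts := by
          unfold pvB_loop
          simp only [h, dif_pos, pv_getD_of_lt pieces i h, ← hp]
          have hop' := hop; simp at hop'
          simp [hop', hfc]
        rw [hB, hdrop, List.foldl_cons, hstep, pv_open_scan _ _ _ hpne, hsc]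
      | some x =>
        obtain ⟨pre, q, post⟩ := x
        rw [hsc] at hfc
        obtain ⟨hj, hdec⟩ := hfc
        have hlen : pieces.length = i + 1 + pre.length + 1 + post.length := by
          have hl := congrArg List.length hdec
          simp at hl
          omega
        have hjne : (pvB_findClose pieces (i + 1) == pieces.length) = false := by
          simp only [hj, beq_eq_false_iff_ne, ne_eq]
          omega
        have htake : (pieces.drop i).take (pvB_findClose pieces (i + 1) + 1 - i) = p :: (pre ++ [q]) := by
          rw [hdrop, hdec, hj]
          have he : i + 1 + pre.length + 1 - i = (pre.length + 1) + 1 := by omega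
          rw [he]
          simp [pv_take_len]
        have hdropj : pieces.drop (pvB_findClose pieces (i + 1) + 1) = post := by
          rw [hj]
          have he : i + 1 + (pre, q, post).1.length + 1 = (i + 1) + (pre.length + 1) := by
            simp; omega
          rw [he, ← List.drop_drop, hdec]
          simp [pv_drop_len]
        have hB : pvB_loop pieces i parts =
            pvB_loop pieces (pvB_findClose pieces (i + 1) + 1)
              (parts ++ [PySem.Str.join " " (p :: (pre ++ [q]))]) := by
          conv_lhs => unfold pvB_loop
          have hop' := hop; simp at hop'
          simp only [h, dif_pos, pv_getD_of_lt pieces i h, ← hp, hop', and_self, if_true,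
            hjne, Bool.false_eq_true, if_false, htake]
          simp [hop']
        rw [hB, pv_loop_eq pieces (pvB_findClose pieces (i + 1) + 1)
          (parts ++ [PySem.Str.join " " (p :: (pre ++ [q]))]), hdropj]
        rw [hdrop, List.foldl_cons, hstep, pv_open_scan _ _ _ hpne, hsc]
    · have hstep : pvA_tokStep (parts, false, "") p = (parts ++ [p], false, "") := by
        have hop' := hop
        simp only [Bool.and_eq_true, Bool.not_eq_true', not_and] at hop'
        by_cases h1 : PySem.Str.isIn "{{" p = true
        · have h2 : PySem.Str.isIn "}}" p = true := by
            have hx := hop' h1; simp at hx; exact hx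
          have h1' := h1; have h2' := h2; simp at h1' h2'
          simp [pvA_tokStep, h1', h2']
        · have h1' : PySem.Str.isIn "{{" p = false := by simpa using h1
          have h1'' := h1'; simp at h1''
          by_cases h2 : PySem.Str.isIn "}}" p = true
          · have h2' := h2; simp at h2'
            simp [pvA_tokStep, h1'', h2']
          · have h2' : PySem.Str.isIn "}}" p = false := by simpa using h2
            have h2'' := h2'; simp at h2''
            simp [pvA_tokStep, h1'', h2'']
      have hB : pvB_loop pieces i parts = pvB_loop pieces (i + 1) (parts ++ [p]) := by
        conv_lhs => unfold pvB_loop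
        have hop' : (PySem.Str.isIn "{{" p && !(PySem.Str.isIn "}}" p)) = false := by
          simpa using hop
        simp at hop'
        simp only [h, dif_pos, pv_getD_of_lt pieces i h, ← hp]
        simp [hop']
        intro h1x h2x
        exact absurd (hop' h1x) (by simp [h2x])
      rw [hB, pv_loop_eq pieces (i + 1) (parts ++ [p]), hdrop, List.foldl_cons, hstep]
  · have hd : pieces.drop i = [] := List.drop_eq_nil_of_le (by omega)
    have hB : pvB_loop pieces i parts = parts := by
      unfold pvB_loop
      simp [h]
    simp [hB, hd]
termination_by pieces.length - i
decreasing_by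
  · have := pvB_findClose_ge pieces (i + 1); omega
  · omega


lemma pv_scan_walk (target : String) (parts : List String) (ci : Int) (h : 0 ≤ ci) :
    (decide (0 ≤ pvA_scan target parts ci) && decide (pvA_scan target parts ci ≤ 1)) =
      pvWalk target parts ci := by
  induction parts generalizing ci with
  | nil => simp [pvA_scan, pvWalk]
  | cons p rest ih =>
    simp only [pvA_scan, pvWalk, pvProgramName]
    by_cases hbrk : (ci == 0 && pvNonExec.contains
        (if !(PySem.Str.isIn "/" p) then p else ((PySem.Str.split? p "/").getD []).getLastD "")) = true
    · simp only [hbrk, if_true]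
      simp
    · simp only [Bool.not_eq_true] at hbrk
      simp only [hbrk, Bool.false_eq_true, if_false]
      by_cases hsw : PySem.Str.startswith p target = true
      · simp only [hsw, if_true]
        simp [h]
      · simp only [Bool.not_eq_true] at hsw
        simp only [hsw, Bool.false_eq_true, if_false]
        by_cases hd : PySem.Str.startswith p "-" = true
        · simp only [hd, if_true]
          exact ih ci h
        · simp only [Bool.not_eq_true] at hd
          simp only [hd, Bool.false_eq_true, if_false]
          exact ih (ci + 1) (by omega)

lemma pv_effs_foldl (parts : List String) (acc : List Int) (c : Int) :
    (parts.foldl (fun (st : List Int × Int) p =>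
      (st.1 ++ [st.2], if !(PySem.Str.startswith p "-") then st.2 + 1 else st.2)) (acc, c)).1 =
      acc ++ pvEffsR c parts := by
  induction parts generalizing acc c with
  | nil => simp [pvEffsR]
  | cons p t ih =>
    simp only [List.foldl_cons, pvEffsR]
    rw [ih]
    simp

lemma pv_effs_eq (parts : List String) : pvB_effs parts = pvEffsR 0 parts := by
  unfold pvB_effs
  simpa using pv_effs_foldl parts [] 0

-- shifting the staged judge past a non-matching, non-breaking head part
lemma pv_shift (target p : String) (t : List String) (c c' : Int)
    (hsw : PySem.Str.startswith p target = false)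
    (hc' : pvEffsR c (p :: t) = c :: pvEffsR c' t)
    (hne : (c == 0 && pvNonExec.contains (pvProgramName p)) = false) :
    pvStaged target (p :: t) c = pvStaged target t c' := by
  have hfc : (p :: t).findIdx? (fun q => PySem.Str.startswith q target) =
      (t.findIdx? (fun q => PySem.Str.startswith q target)).map (· + 1) := by
    simp only [List.findIdx?_cons, hsw, Bool.false_eq_true, if_false]
  cases hfi : t.findIdx? (fun q => PySem.Str.startswith q target) with
  | none =>
    rw [pvStaged_none (by rw [hfc, hfi]; rfl), pvStaged_none hfi]
  | some m =>
    rw [pvStaged_some (show (p :: t).findIdx? (fun q => PySem.Str.startswith q target) =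
        some (m + 1) by rw [hfc, hfi]; rfl), pvStaged_some hfi]
    unfold pvStagedIf
    have hany : ((List.range (m + 1 + 1)).any (fun i =>
        (pvEffsR c (p :: t)).getD i 0 == 0 &&
          pvNonExec.contains (pvProgramName ((p :: t).getD i "")))) =
        ((List.range (m + 1)).any (fun i =>
        (pvEffsR c' t).getD i 0 == 0 &&
          pvNonExec.contains (pvProgramName (t.getD i "")))) := by
      rw [List.range_succ_eq_map, List.any_cons, List.any_map]
      have hf0 : ((pvEffsR c (p :: t)).getD 0 0 == 0 &&
          pvNonExec.contains (pvProgramName ((p :: t).getD 0 ""))) = false := by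
        rw [hc']; simpa using hne
      rw [hf0, Bool.false_or]
      congr 1
      funext i
      simp only [Function.comp_def, hc', List.getD_cons_succ]
    rw [hany, hc']
    simp

lemma pv_staged_walk (target : String) (parts : List String) (c : Int) :
    pvStaged target parts c = pvWalk target parts c := by
  induction parts generalizing c with
  | nil => simp [pvStaged, pvWalk]
  | cons p t ih =>
    by_cases hsw : PySem.Str.startswith p target = true
    · have hfc : (p :: t).findIdx? (fun q => PySem.Str.startswith q target) = some 0 := by
        simp only [List.findIdx?_cons, hsw, if_true]
      rw [pvStaged_some hfc]
      have hL : pvStagedIf target (p :: t) c 0 =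
          (if (c == 0 && pvNonExec.contains (pvProgramName p)) = true then false
           else decide (c ≤ 1)) := by
        unfold pvStagedIf
        simp [pvEffsR, List.range_succ]
      have hW : pvWalk target (p :: t) c =
          (if (c == 0 && pvNonExec.contains (pvProgramName p)) = true then false
           else decide (c ≤ 1)) := by
        simp only [pvWalk, hsw, if_true]
      rw [hL, hW]
    · have hsw' : PySem.Str.startswith p target = false := by simpa using hsw
      have hfc : (p :: t).findIdx? (fun q => PySem.Str.startswith q target) =
          (t.findIdx? (fun q => PySem.Str.startswith q target)).map (· + 1) := by
        simp only [List.findIdx?_cons, hsw', Bool.false_eq_true, if_false]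
      by_cases hne : (c == 0 && pvNonExec.contains (pvProgramName p)) = true
      · -- the non-exec break fires on the head part: both sides are false
        have hW : pvWalk target (p :: t) c = false := by
          simp only [pvWalk, hne, if_true]
        rw [hW]
        cases hfi : t.findIdx? (fun q => PySem.Str.startswith q target) with
        | none => rw [pvStaged_none (by rw [hfc, hfi]; rfl)]
        | some m =>
          rw [pvStaged_some (show (p :: t).findIdx? (fun q => PySem.Str.startswith q target) =
              some (m + 1) by rw [hfc, hfi]; rfl)]
          unfold pvStagedIf
          have hany : ((List.range (m + 1 + 1)).any (fun i =>
              (pvEffsR c (p :: t)).getD i 0 == 0 &&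
                pvNonExec.contains (pvProgramName ((p :: t).getD i "")))) = true := by
            apply List.any_eq_true.mpr
            exact ⟨0, by simp, by simpa [pvEffsR] using hne⟩
          rw [hany]
          simp
      · simp only [Bool.not_eq_true] at hne
        by_cases hd : PySem.Str.startswith p "-" = true
        · have hdC := hd; simp at hdC
          have hc' : pvEffsR c (p :: t) = c :: pvEffsR c t := by simp [pvEffsR, hdC]
          have hW : pvWalk target (p :: t) c = pvWalk target t c := by
            simp only [pvWalk, hne, Bool.false_eq_true, if_false, hsw', hd, if_true]
          rw [pv_shift target p t c c hsw' hc' hne, ih c, hW]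
        · have hd' : PySem.Str.startswith p "-" = false := by simpa using hd
          have hdC := hd'; simp at hdC
          have hc' : pvEffsR c (p :: t) = c :: pvEffsR (c + 1) t := by simp [pvEffsR, hdC]
          have hW : pvWalk target (p :: t) c = pvWalk target t (c + 1) := by
            simp only [pvWalk, hne, Bool.false_eq_true, if_false, hsw', hd']
          rw [pv_shift target p t c (c + 1) hsw' hc' hne, ih (c + 1), hW]

lemma pv_tokenize_eq (line : String) :
    (((PySem.Str.split? line " ").getD []).foldl pvA_tokStep ([], false, "")).1 =
      pvB_tokenize line := by
  unfold pvB_tokenize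
  rw [pv_loop_eq]
  simp

lemma pvB_primary_staged (line target : String) :
    pvB_primary line target = pvStaged target (pvB_tokenize line) 0 := by
  cases hfi : (pvB_tokenize line).findIdx? (fun p => PySem.Str.startswith p target) with
  | none =>
    rw [pvStaged_none hfi]
    simp only [pvB_primary, hfi]
  | some m =>
    rw [pvStaged_some hfi]
    simp only [pvB_primary, hfi, pvStagedIf, pv_effs_eq]

lemma pv_primary_eq (line target : String) :
    pvA_isPrimary line target = pvB_primary line target := by
  simp only [pvA_isPrimary]
  rw [pv_tokenize_eq, pv_scan_walk target (pvB_tokenize line) 0 (by omega),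
    ← pv_staged_walk target (pvB_tokenize line) 0, ← pvB_primary_staged]

lemma pv_lineLoop_eq (target : String) (lines : List String) :
    pvA_lineLoop target lines =
      lines.any (fun line => PySem.Str.isIn target line &&
        (PySem.Str.startswith line target || pvB_primary line target)) := by
  induction lines with
  | nil => rfl
  | cons line rest ih =>
    by_cases hin : PySem.Str.isIn target line = true
    · have hinC := hin; simp at hinC
      by_cases hsw : PySem.Str.startswith line target = true
      · have hswC := hsw; simp at hswC
        simp [pvA_lineLoop, hinC, hswC]
      · have hswC : PySem.Chars.startswith line.toList target.toList = false := by
          simpa using hsw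
        by_cases hpr : pvA_isPrimary line target = true
        · simp [pvA_lineLoop, hinC, hswC, hpr, ← pv_primary_eq]
        · have hpr' : pvA_isPrimary line target = false := by simpa using hpr
          simp [pvA_lineLoop, hinC, hswC, hpr', ← pv_primary_eq, ih]
    · have hinC : PySem.Chars.isIn target.toList line.toList = false := by simpa using hin
      simp [pvA_lineLoop, hinC, ih]

-- ===== VERDICT (by name: the statement is the Claim_ definition above) =====
theorem is_executed_py_spec : Claim_equal_is_executed_py := by
  intro cmd_str target _
  unfold Spec_is_executed_py is_executed_py is_executed_py_alt
  exact pv_lineLoop_eq target (PySem.Str.splitlines cmd_str)
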